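-- pv_equiv track=rewrite | github.com/agshumate/LiftoffTools | liftofftools/variants/variants.py | is_frameshift
-- ===== SOURCE A (Python) =====
-- def is_frameshift(dna):
--     prev_letter=''
--     count = 0
--     for letter in dna:
--         if letter!=prev_letter:
--             if prev_letter == "-" and count %3 !=0:
--                 return True
--             count = 1
--         else:
--             count += 1
--         prev_letter = letter
--     return False
-- ===== SOURCE B (Python) =====
-- def _runs(s):
--     runs = []
--     i = 0
--     n = len(s)
--     while i < n:
--         j = i + 1
--         while j < n and s[j] == s[i]:
--             j += 1
--         runs.append((s[i], j - i))
--         i = j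
--     return runs
--
--
-- def is_frameshift(dna):
--     runs = _runs(dna)
--     return any(c == '-' and n % 3 != 0 for c, n in runs[:-1])
-- ===== Notes on version B (the rewrite author's own statement) =====
-- stated objective: alternative
-- what changed: Replaced A's single-pass prev/count state machine (with the frameshift test interleaved into the scan) by a two-phase algorithm: run-length-encode the string, then test the dash runs of runs[:-1]; the dropped last run reproduces A's rule that a trailing gap run is never checked.
import Mathlib
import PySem

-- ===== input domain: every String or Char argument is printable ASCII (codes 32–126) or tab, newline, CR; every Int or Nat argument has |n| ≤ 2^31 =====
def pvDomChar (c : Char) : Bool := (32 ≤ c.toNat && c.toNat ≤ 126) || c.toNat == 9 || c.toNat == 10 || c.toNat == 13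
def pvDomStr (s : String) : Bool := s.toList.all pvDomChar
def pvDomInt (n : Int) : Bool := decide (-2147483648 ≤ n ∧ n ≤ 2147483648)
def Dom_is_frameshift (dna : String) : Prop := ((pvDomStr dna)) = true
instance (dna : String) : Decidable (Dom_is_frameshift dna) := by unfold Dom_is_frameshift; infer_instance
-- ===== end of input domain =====

-- B replaces A's interleaved prev/count state machine by run-length encoding followed
-- by a scan of all runs but the last (alternative decomposition; same O(n) cost).

-- ===== PORT A =====
-- A's loop state: prev_letter (none models Python's initial '') and count.
def fsLoop : List Char → Option Char → Nat → Bool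
  | [], _, _ => false
  | letter :: rest, prev, count =>
    if some letter ≠ prev then
      if prev = some '-' ∧ count % 3 ≠ 0 then true
      else fsLoop rest (some letter) 1
    else fsLoop rest (some letter) (count + 1)

def is_frameshift (dna : String) : Bool := fsLoop dna.toList none 0

-- ===== PORT B =====
-- _runs: the outer while advances i to j past the maximal run starting at i
-- (inner while = takeWhile count; i = j = dropWhile).
def fsRuns : List Char → List (Char × Nat)
  | [] => []
  | c :: cs =>
      (c, 1 + (cs.takeWhile (· == c)).length) :: fsRuns (cs.dropWhile (· == c))
  termination_by xs => xs.length
  decreasing_by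
    simpa using Nat.lt_succ_of_le (List.length_dropWhile_le (· == c) cs)

def is_frameshift_alt (dna : String) : Bool :=
  ((fsRuns dna.toList).dropLast).any (fun cn => cn.1 == '-' && cn.2 % 3 != 0)

-- ===== PRECONDITION & SPEC =====
def Spec_is_frameshift (dna : String) (out : Bool) : Prop := out = is_frameshift_alt dna
instance (dna : String) (out : Bool) : Decidable (Spec_is_frameshift dna out) := by unfold Spec_is_frameshift; infer_instance

-- ===== CLAIM (what is proved, stated in full; the proofs are below) =====
def Claim_equal_is_frameshift : Prop := ∀ (dna : String), Dom_is_frameshift dna → Spec_is_frameshift dna (is_frameshift dna)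

-- ===== LEMMAS AND PROOFS =====

-- B's check applied to a char list.
def fsAltOn (xs : List Char) : Bool :=
  ((fsRuns xs).dropLast).any (fun cn => cn.1 == '-' && cn.2 % 3 != 0)

lemma fsRuns_nil : fsRuns [] = [] := by simp [fsRuns]

lemma fsRuns_cons (c : Char) (cs : List Char) :
    fsRuns (c :: cs) =
      (c, 1 + (cs.takeWhile (· == c)).length) :: fsRuns (cs.dropWhile (· == c)) := by
  simp [fsRuns]

lemma fsRuns_ne_nil (c : Char) (cs : List Char) : fsRuns (c :: cs) ≠ [] := by
  simp [fsRuns_cons]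

-- fsRuns of a nonempty run of p followed by a list not starting with p.
lemma fsRuns_replicate_append (p : Char) (rest : List Char)
    (hrest : ∀ d ∈ rest.head?, d ≠ p) :
    ∀ n, 1 ≤ n → fsRuns (List.replicate n p ++ rest) = (p, n) :: fsRuns rest := by
  have hTake : rest.takeWhile (· == p) = [] := by
    cases rest with
    | nil => simp
    | cons d ds =>
      have hb : (d == p) = false := by
        simp [hrest d (by simp)]
      simp [List.takeWhile, hb]
  have hDrop : rest.dropWhile (· == p) = rest := by
    cases rest with
    | nil => simp
    | cons d ds =>
      have hb : (d == p) = false := by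
        simp [hrest d (by simp)]
      simp [List.dropWhile, hb]
  intro n hn
  induction n with
  | zero => omega
  | succ m ih =>
    by_cases hm : 1 ≤ m
    · have ihm := ih hm
      -- replicate (m+1) p ++ rest = p :: (replicate m p ++ rest)
      rw [List.replicate_succ, List.cons_append, fsRuns_cons]
      cases m with
      | zero => omega
      | succ k =>
        have htw : ((List.replicate (k+1) p ++ rest).takeWhile (· == p))
            = List.replicate (k+1) p := by
          rw [List.takeWhile_append]
          simp [hTake]
        have hdw : ((List.replicate (k+1) p ++ rest).dropWhile (· == p)) = rest := by
          rw [List.dropWhile_append]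
          simp [hDrop]
        rw [htw, hdw]
        simp [List.length_replicate]
        omega
    · have hm0 : m = 0 := by omega
      subst hm0
      simp [fsRuns_cons, hTake, hDrop]

-- Main invariant: A's loop with a nonempty current run (p repeated n times already
-- read) computes B's check on the unread input prefixed by that run.
lemma fsLoop_eq_alt :
    ∀ (cs : List Char) (p : Char) (n : Nat), 1 ≤ n →
      fsLoop cs (some p) n = fsAltOn (List.replicate n p ++ cs) := by
  intro cs
  induction cs with
  | nil =>
    intro p n hn
    have h := fsRuns_replicate_append p [] (by simp) n hn
    simp only [List.append_nil] at h
    simp [fsLoop, fsAltOn, h, fsRuns_nil]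
  | cons c cs' ih =>
    intro p n hn
    by_cases hcp : c = p
    · subst hcp
      have h1 : fsLoop (c :: cs') (some c) n = fsLoop cs' (some c) (n + 1) := by
        simp [fsLoop]
      have h2 : List.replicate n c ++ (c :: cs') = List.replicate (n + 1) c ++ cs' := by
        rw [List.replicate_succ']
        simp
      rw [h1, h2, ← ih c (n + 1) (by omega)]
    · have hruns : fsRuns (List.replicate n p ++ (c :: cs')) =
          (p, n) :: fsRuns (c :: cs') := by
        apply fsRuns_replicate_append p (c :: cs') _ n hn
        intro d hd
        simp at hd
        subst hd
        exact hcp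
      have hne := fsRuns_ne_nil c cs'
      have hdl : ((p, n) :: fsRuns (c :: cs')).dropLast
          = (p, n) :: (fsRuns (c :: cs')).dropLast := by
        exact List.dropLast_cons_of_ne_nil hne
      have hA : fsLoop (c :: cs') (some p) n =
          if p = '-' ∧ n % 3 ≠ 0 then true else fsLoop cs' (some c) 1 := by
        have : some c ≠ some p := by simp [hcp]
        simp [fsLoop, this]
      have hB : fsAltOn (List.replicate n p ++ (c :: cs')) =
          ((p == '-' && n % 3 != 0) || fsAltOn (c :: cs')) := by
        simp [fsAltOn, hruns, hdl]
      rw [hA, hB]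
      have hrec : fsLoop cs' (some c) 1 = fsAltOn (c :: cs') := by
        have := ih c 1 (by omega)
        simpa using this
      rw [hrec]
      by_cases hcond : p = '-' ∧ n % 3 ≠ 0
      · simp [hcond.1, hcond.2]
      · rw [if_neg hcond]
        rcases Decidable.not_and_iff_or_not.mp hcond with h | h
        · simp [beq_iff_eq, h]
        · have : n % 3 = 0 := by omega
          simp [this]

-- ===== VERDICT (by name: the statement is the Claim_ definition above) =====
theorem is_frameshift_spec : Claim_equal_is_frameshift := by
  intro dna _
  unfold Spec_is_frameshift is_frameshift is_frameshift_alt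
  cases h : dna.toList with
  | nil => simp [fsLoop, fsRuns_nil]
  | cons c cs =>
    have h0 : fsLoop (c :: cs) none 0 = fsLoop cs (some c) 1 := by
      simp [fsLoop]
    have h1 := fsLoop_eq_alt cs c 1 (by omega)
    have h2 : List.replicate 1 c ++ cs = c :: cs := by simp
    rw [h2] at h1
    rw [h0, h1]
    rfl
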